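-- pv_equiv track=rewrite | github.com/yairchu/azlemi | vote/render_content.py | sorted_results
-- ===== SOURCE A (Python) =====
-- def sorted_results(results):
--     def key(x):
--         return (-x[1]['overall'], x[0])
--     prev_score = None
--     for idx, (party_name, score) in enumerate(sorted(list(results.items()), key=key)):
--         if idx == 0 or score['overall'] < prev_score['overall']:
--             pos = idx+1
--         prev_score = score
--         yield pos, party_name, score
-- ===== SOURCE B (Python) =====
-- def sorted_results(results):
--     items = sorted(results.items(), key=lambda x: (-x[1]['overall'], x[0]))
--     offset = 0
--     while items:
--         o = items[0][1]['overall']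
--         k = 0
--         while k < len(items) and items[k][1]['overall'] == o:
--             k += 1
--         for name, score in items[:k]:
--             yield offset + 1, name, score
--         offset += k
--         items = items[k:]
-- ===== Notes on version B (the rewrite author's own statement) =====
-- stated objective: alternative
-- what changed: B replaces A's per-element prev_score/pos state machine with a run-based pass: after the same sort it finds each maximal run of equal 'overall' scores and emits the whole tie group at rank offset+1, advancing the offset by the group length.
import Mathlib
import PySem

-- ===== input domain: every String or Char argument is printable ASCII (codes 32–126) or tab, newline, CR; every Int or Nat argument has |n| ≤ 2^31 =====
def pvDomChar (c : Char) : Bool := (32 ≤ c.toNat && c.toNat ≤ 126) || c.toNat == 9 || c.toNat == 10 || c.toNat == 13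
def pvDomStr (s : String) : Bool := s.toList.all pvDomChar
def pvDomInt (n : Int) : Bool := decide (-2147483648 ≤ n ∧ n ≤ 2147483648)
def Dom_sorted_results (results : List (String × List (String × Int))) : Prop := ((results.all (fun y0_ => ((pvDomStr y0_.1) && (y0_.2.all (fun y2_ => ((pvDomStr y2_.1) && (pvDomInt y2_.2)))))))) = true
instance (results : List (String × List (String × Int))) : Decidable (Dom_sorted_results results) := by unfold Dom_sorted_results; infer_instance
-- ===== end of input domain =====

-- B yields the same tie-aware ranking run-by-run (one tie group at a time) instead of A's
-- per-element prev_score tracking; equivalence is about the returned (materialised) generator values.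

-- score['overall'] (Pre_ guarantees the key is present, so the default 0 is never the Python-visible value)
def pvOverall (sc : List (String × Int)) : Int := PySem.Dict.getD (PySem.Dict.mk sc) "overall" 0

-- ===== PORT A =====
-- the enumerate loop: state = (idx, prev_score's overall, pos); at idx = 0 prev/pos are not consulted
def pvAGo : List (String × List (String × Int)) → Int → Int → Int → List (Int × String × (List (String × Int)))
  | [], _, _, _ => []
  | (name, sc) :: rest, idx, prevOv, pos =>
    let pos' := if idx = 0 ∨ pvOverall sc < prevOv then idx + 1 else pos
    (pos', name, sc) :: pvAGo rest (idx + 1) (pvOverall sc) pos'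

def sorted_results (results : List (String × List (String × Int))) : List (Int × String × (List (String × Int))) :=
  pvAGo (PySem.List.sorted2 results (fun x => -(pvOverall x.2)) (fun x => x.1)) 0 0 0

-- ===== PORT B =====
-- the inner `while k < len(items) and items[k][1]['overall'] == o: k += 1`
def pvRunLen (o : Int) : List (String × List (String × Int)) → Nat
  | [] => 0
  | x :: rest => if pvOverall x.2 = o then pvRunLen o rest + 1 else 0

-- the outer `while items:` loop, state = (items, offset)
def pvBGo : List (String × List (String × Int)) → Int → List (Int × String × (List (String × Int)))
  | [], _ => []
  | x :: rest, off =>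
    let o := pvOverall x.2
    let k := pvRunLen o (x :: rest)
    ((x :: rest).take k).map (fun y => (off + 1, y.1, y.2)) ++ pvBGo ((x :: rest).drop k) (off + (k : Int))
termination_by l _ => l.length
decreasing_by
  have h : 0 < pvRunLen (pvOverall x.2) (x :: rest) := by simp [pvRunLen]
  simp only [List.length_drop, List.length_cons]
  omega

def sorted_results_alt (results : List (String × List (String × Int))) : List (Int × String × (List (String × Int))) :=
  pvBGo (PySem.List.sorted2 results (fun x => -(pvOverall x.2)) (fun x => x.1)) 0

-- ===== PRECONDITION & SPEC =====
-- Pre_ excludes (a) inputs where some score dict lacks the key 'overall', on which the Python A raises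
-- KeyError inside the sort key, and (b) association lists with duplicate party names, which do not denote
-- a Python dict (the dict passed to A collapses them, an accident of the encoding; A and B agree there).
def Pre_sorted_results (results : List (String × List (String × Int))) : Prop :=
  (results.map (·.1)).Nodup ∧ ∀ p ∈ results, "overall" ∈ p.2.map (·.1)
instance (results : List (String × List (String × Int))) : Decidable (Pre_sorted_results results) := by
  unfold Pre_sorted_results; infer_instance

def pvWitness_sorted_results : (List (String × List (String × Int))) :=
  [("a", [("overall", 3)]), ("b", [("overall", 3), ("x", 1)]), ("c", [("overall", 1)])]

def Spec_sorted_results (results : List (String × List (String × Int))) (out : List (Int × String × (List (String × Int)))) : Prop := out = sorted_results_alt results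
instance (results : List (String × List (String × Int))) (out : List (Int × String × (List (String × Int)))) : Decidable (Spec_sorted_results results out) := by unfold Spec_sorted_results; infer_instance

-- ===== CLAIM (what is proved, stated in full; the proofs are below) =====
def Claim_equal_sorted_results : Prop := ∀ (results : List (String × List (String × Int))), Dom_sorted_results results → Pre_sorted_results results → Spec_sorted_results results (sorted_results results)

-- ===== LEMMAS AND PROOFS =====

-- the comparator of sorted2 with first key -overall: the sorted list is non-increasing in overall
theorem pv_insertBy_noninc (x : String × List (String × Int)) (ys : List (String × List (String × Int)))
    (h : ys.Pairwise (fun a b => pvOverall b.2 ≤ pvOverall a.2)) :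
    (PySem.List.insertBy
      (fun a b => decide (-(pvOverall a.2) < -(pvOverall b.2)) ||
        (!decide (-(pvOverall b.2) < -(pvOverall a.2)) && decide (a.1 < b.1))) x ys).Pairwise
      (fun a b => pvOverall b.2 ≤ pvOverall a.2) := by
  induction ys with
  | nil => simp [PySem.List.insertBy]
  | cons y ys ih =>
    rw [List.pairwise_cons] at h
    simp only [PySem.List.insertBy]
    split
    · rename_i hb
      simp only [Bool.or_eq_true, Bool.and_eq_true, decide_eq_true_eq, Bool.not_eq_true',
        decide_eq_false_iff_not] at hb
      have hxy : pvOverall y.2 ≤ pvOverall x.2 := by omega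
      refine List.Pairwise.cons ?_ (List.Pairwise.cons h.1 h.2)
      intro z hz
      rcases List.mem_cons.mp hz with rfl | hz
      · exact hxy
      · exact le_trans (h.1 z hz) hxy
    · rename_i hb
      simp only [Bool.or_eq_true, Bool.and_eq_true, decide_eq_true_eq, Bool.not_eq_true',
        decide_eq_false_iff_not, not_or, not_and] at hb
      have hyx : pvOverall x.2 ≤ pvOverall y.2 := by omega
      refine List.Pairwise.cons ?_ (ih h.2)
      intro z hz
      rw [PySem.List.mem_insertBy] at hz
      rcases hz with rfl | hz
      · exact hyx
      · exact h.1 z hz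

theorem pv_sorted2_noninc (xs : List (String × List (String × Int))) :
    (PySem.List.sorted2 xs (fun x => -(pvOverall x.2)) (fun x => x.1)).Pairwise
      (fun a b => pvOverall b.2 ≤ pvOverall a.2) := by
  have key : ∀ (l acc : List (String × List (String × Int))),
      acc.Pairwise (fun a b => pvOverall b.2 ≤ pvOverall a.2) →
      (List.foldl (fun acc x => PySem.List.insertBy
        (fun a b => decide (-(pvOverall a.2) < -(pvOverall b.2)) ||
          (!decide (-(pvOverall b.2) < -(pvOverall a.2)) && decide (a.1 < b.1))) x acc) acc l).Pairwise
        (fun a b => pvOverall b.2 ≤ pvOverall a.2) := by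
    intro l
    induction l with
    | nil => intro acc h; simpa using h
    | cons x l ih => intro acc h; exact ih _ (pv_insertBy_noninc x acc h)
  simpa [PySem.List.sorted2] using key xs [] (by simp)

theorem pvRunLen_eq_takeWhile (o : Int) (l : List (String × List (String × Int))) :
    pvRunLen o l = (l.takeWhile (fun y => pvOverall y.2 == o)).length := by
  induction l with
  | nil => rfl
  | cons x rest ih =>
    by_cases h : pvOverall x.2 = o <;> simp [pvRunLen, h, ih]

-- A consumes a run of equal scores without changing pos (idx ≠ 0 along the run)
theorem pvAGo_run (t : List (String × List (String × Int))) :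
    ∀ (r' : List (String × List (String × Int))) (idx o pos : Int),
    0 < idx → (∀ y ∈ t, pvOverall y.2 = o) →
    pvAGo (t ++ r') idx o pos
      = t.map (fun y => (pos, y.1, y.2)) ++ pvAGo r' (idx + (t.length : Int)) o pos := by
  induction t with
  | nil => intro r' idx o pos _ _; simp
  | cons y t ih =>
    intro r' idx o pos hidx hall
    obtain ⟨nm, sc⟩ := y
    have hy : pvOverall sc = o := hall (nm, sc) (by simp)
    have hcond : ¬ (idx = 0 ∨ pvOverall sc < o) := by omega
    simp only [List.cons_append, pvAGo, if_neg hcond]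
    rw [hy, ih r' (idx + 1) o pos (by omega) (fun z hz => hall z (by simp [hz]))]
    simp only [List.map_cons, List.length_cons, List.cons_append]
    congr 3
    push_cast
    ring

-- main lemma: from a group boundary on, A's pass equals B's run-by-run pass
theorem pv_main (n : Nat) : ∀ (s : List (String × List (String × Int))), s.length ≤ n →
    s.Pairwise (fun a b => pvOverall b.2 ≤ pvOverall a.2) →
    ∀ (idx prev pos : Int), 0 ≤ idx →
    (idx = 0 ∨ (∀ z, s.head? = some z → pvOverall z.2 < prev)) →
    pvAGo s idx prev pos = pvBGo s idx := by
  induction n with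
  | zero =>
    intro s hlen _ idx prev pos _ _
    have hs : s = [] := List.length_eq_zero_iff.mp (Nat.le_zero.mp hlen)
    subst hs; simp [pvAGo, pvBGo]
  | succ n ih =>
    intro s hlen hpw idx prev pos hidx hbnd
    match s with
    | [] => simp [pvAGo, pvBGo]
    | (name, sc) :: rest =>
      have hcond : idx = 0 ∨ pvOverall sc < prev := by
        rcases hbnd with h | h
        · exact Or.inl h
        · exact Or.inr (h (name, sc) rfl)
      rw [List.pairwise_cons] at hpw
      set t := rest.takeWhile (fun y => pvOverall y.2 == pvOverall sc) with ht
      set r' := rest.dropWhile (fun y => pvOverall y.2 == pvOverall sc) with hr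
      have hsplit : rest = t ++ r' := (List.takeWhile_append_dropWhile).symm
      have htall : ∀ y ∈ t, pvOverall y.2 = pvOverall sc := by
        intro y hy
        have := List.mem_takeWhile_imp (ht ▸ hy)
        simpa using this
      -- A side
      have hA : pvAGo ((name, sc) :: rest) idx prev pos
          = (idx + 1, name, sc) :: pvAGo rest (idx + 1) (pvOverall sc) (idx + 1) := by
        simp only [pvAGo]
        rw [if_pos hcond]
      -- run consumption
      have hArun : pvAGo rest (idx + 1) (pvOverall sc) (idx + 1)
          = t.map (fun y => (idx + 1, y.1, y.2))
            ++ pvAGo r' (idx + 1 + (t.length : Int)) (pvOverall sc) (idx + 1) := by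
        conv_lhs => rw [hsplit]
        exact pvAGo_run t r' (idx + 1) (pvOverall sc) (idx + 1) (by omega) htall
      -- tail is again at a group boundary
      have hr'bnd : ∀ z, r'.head? = some z → pvOverall z.2 < pvOverall sc := by
        intro z hz
        have hzmem : z ∈ r' := List.mem_of_mem_head? hz
        have hzrest : z ∈ rest := hsplit ▸ List.mem_append_right t hzmem
        have hle : pvOverall z.2 ≤ pvOverall sc := hpw.1 z hzrest
        have hne : ¬ (pvOverall z.2 == pvOverall sc) = true := by
          have h0 := List.head?_dropWhile_not (p := fun y => pvOverall y.2 == pvOverall sc) rest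
          rw [← hr] at h0
          simpa [hz] using h0
        simp only [beq_iff_eq] at hne
        omega
      have hpwr' : r'.Pairwise (fun a b => pvOverall b.2 ≤ pvOverall a.2) :=
        hpw.2.sublist (hr ▸ List.dropWhile_sublist _)
      have hAr' : pvAGo r' (idx + 1 + (t.length : Int)) (pvOverall sc) (idx + 1)
          = pvBGo r' (idx + 1 + (t.length : Int)) := by
        refine ih r' ?_ hpwr' _ (pvOverall sc) (idx + 1) (by omega) (Or.inr hr'bnd)
        have h1 : r'.length ≤ rest.length := (hr ▸ List.dropWhile_sublist _).length_le
        simp only [List.length_cons] at hlen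
        omega
      -- B side
      have hk : pvRunLen (pvOverall sc) ((name, sc) :: rest) = t.length + 1 := by
        simp [pvRunLen, pvRunLen_eq_takeWhile, ht]
      have htake : ((name, sc) :: rest).take (t.length + 1) = (name, sc) :: t := by
        simp only [List.take_succ_cons, hsplit, List.take_left]
      have hdrop : ((name, sc) :: rest).drop (t.length + 1) = r' := by
        simp only [List.drop_succ_cons, hsplit, List.drop_left]
      have harith : idx + ((t.length + 1 : Nat) : Int) = idx + 1 + (t.length : Int) := by
        push_cast; ring
      have hB : pvBGo ((name, sc) :: rest) idx
          = ((name, sc) :: t).map (fun y => (idx + 1, y.1, y.2))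
            ++ pvBGo r' (idx + 1 + (t.length : Int)) := by
        rw [pvBGo.eq_def]
        simp only [hk, htake, hdrop, harith]
      rw [hA, hArun, hAr', hB]
      simp

-- ===== VERDICT (by name: the statement is the Claim_ definition above) =====
theorem sorted_results_spec : Claim_equal_sorted_results := by
  intro results _ _
  unfold Spec_sorted_results sorted_results sorted_results_alt
  exact pv_main _ _ le_rfl (pv_sorted2_noninc results) 0 0 0 le_rfl (Or.inl rfl)
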